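-- pv_equiv track=rewrite | github.com/AAIR-lab/CHiRP | src/option_invention/options_inventor.py | compute_salient_indices
-- ===== SOURCE A (Python) =====
-- def compute_salient_indices(optimal_trajectory, distances):
--     salient_indices = []
--     abstraction_dist_threshold = 0
--     for i in range(1,len(optimal_trajectory)):
--         # prev_trans, prev_dist = optimal_trajectory[i-1], distances[i-1]  #distances[i-1][2]
--         next_trans, next_dist = optimal_trajectory[i], distances[i]      #distances[i][2]
--         # if (prev_dist <= abstraction_dist_threshold < next_dist) or (prev_dist > abstraction_dist_threshold >= next_dist):
--         if next_dist > abstraction_dist_threshold: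
--             if i-1 not in salient_indices and i >= 0:
--                 salient_indices.append(i-1)
--             if i not in salient_indices:
--                 salient_indices.append(i)
--     if len(optimal_trajectory)-1 not in salient_indices:
--         salient_indices.append(len(optimal_trajectory)-1)
--     return salient_indices
-- ===== SOURCE B (Python) =====
-- def compute_salient_indices(optimal_trajectory, distances):
--     n = len(optimal_trajectory)
--     # An index j < n-1 is salient iff it sits next to a positive distance:
--     # distances[j+1] > 0 (it precedes one) or j >= 1 and distances[j] > 0 (it is one).
--     # The last index n-1 is always salient.
--     return [j for j in range(n - 1)
--             if distances[j + 1] > 0 or (1 <= j and distances[j] > 0)] + [n - 1]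
-- ===== Notes on version B (the rewrite author's own statement) =====
-- stated objective: simpler
-- what changed: A appends trigger pairs (i-1, i) with membership-test-then-append dedup branches over a growing list; B instead tests each output position j once for the closed condition 'adjacent to a positive distance' (distances[j+1]>0 or j>=1 and distances[j]>0) in a single filtering comprehension and appends the last index, with no dedup structure at all.
import Mathlib
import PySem

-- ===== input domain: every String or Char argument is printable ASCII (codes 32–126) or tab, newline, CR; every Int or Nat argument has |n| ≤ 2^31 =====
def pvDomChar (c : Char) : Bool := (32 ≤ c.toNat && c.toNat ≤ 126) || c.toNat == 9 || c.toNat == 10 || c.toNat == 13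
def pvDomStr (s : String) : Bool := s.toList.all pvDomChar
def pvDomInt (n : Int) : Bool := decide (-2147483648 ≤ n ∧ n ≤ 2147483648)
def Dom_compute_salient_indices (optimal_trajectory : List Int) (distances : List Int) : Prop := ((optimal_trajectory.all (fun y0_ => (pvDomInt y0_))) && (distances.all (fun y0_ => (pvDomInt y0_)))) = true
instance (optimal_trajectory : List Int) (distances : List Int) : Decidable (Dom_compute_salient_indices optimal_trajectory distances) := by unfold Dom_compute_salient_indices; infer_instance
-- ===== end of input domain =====

-- B replaces A's trigger-driven appends with dedup by a direct per-index membership test: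
-- index j is salient iff it is adjacent to a positive distance (objective: simpler).

-- ===== PORT A =====
def compute_salient_indices (optimal_trajectory : List Int) (distances : List Int) : List Int :=
  let salient_indices : List Int :=
    (PySem.List.pyRange 1 (PySem.List.len optimal_trajectory)).foldl
      (fun salient_indices i =>
        let _next_trans := PySem.List.pyGetD optimal_trajectory i 0  -- always in range (1 ≤ i < len)
        let next_dist := PySem.List.pyGetD distances i 0  -- in range under Pre_ (IndexError excluded)
        if next_dist > 0 then
          let salient_indices :=
            if salient_indices.contains (i - 1) = false ∧ 0 ≤ i then salient_indices ++ [i - 1]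
            else salient_indices
          if salient_indices.contains i = false then salient_indices ++ [i]
          else salient_indices
        else salient_indices) []
  if salient_indices.contains (PySem.List.len optimal_trajectory - 1) = false then
    salient_indices ++ [PySem.List.len optimal_trajectory - 1]
  else salient_indices

-- ===== PORT B =====
def compute_salient_indices_alt (optimal_trajectory : List Int) (distances : List Int) : List Int :=
  let n := PySem.List.len optimal_trajectory
  ((PySem.List.pyRange 0 (n - 1)).filter
    (fun j =>
      decide (PySem.List.pyGetD distances (j + 1) 0 > 0) ||
        (decide ((1 : Int) ≤ j) && decide (PySem.List.pyGetD distances j 0 > 0))))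
    ++ [n - 1]

-- ===== PRECONDITION & SPEC =====
-- Pre_ excludes exactly the inputs where Python A raises IndexError reading distances[i]
-- (trajectory longer than 1 but distances shorter than the trajectory); B raises there too.
def Pre_compute_salient_indices (optimal_trajectory : List Int) (distances : List Int) : Prop :=
  optimal_trajectory.length ≤ 1 ∨ optimal_trajectory.length ≤ distances.length
instance (optimal_trajectory : List Int) (distances : List Int) : Decidable (Pre_compute_salient_indices optimal_trajectory distances) := by unfold Pre_compute_salient_indices; infer_instance
def pvWitness_compute_salient_indices : List Int × List Int := ([0, 1, 2], [0, 5, 0])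

def Spec_compute_salient_indices (optimal_trajectory : List Int) (distances : List Int) (out : List Int) : Prop := out = compute_salient_indices_alt optimal_trajectory distances
instance (optimal_trajectory : List Int) (distances : List Int) (out : List Int) : Decidable (Spec_compute_salient_indices optimal_trajectory distances out) := by unfold Spec_compute_salient_indices; infer_instance

-- ===== CLAIM (what is proved, stated in full; the proofs are below) =====
def Claim_equal_compute_salient_indices : Prop := ∀ (optimal_trajectory : List Int) (distances : List Int), Dom_compute_salient_indices optimal_trajectory distances → Pre_compute_salient_indices optimal_trajectory distances → Spec_compute_salient_indices optimal_trajectory distances (compute_salient_indices optimal_trajectory distances)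

-- ===== LEMMAS AND PROOFS =====

-- A's loop body after collapsing the membership-append idiom, as a named step function.
def pvStep (distances : List Int) (s : List Int) (i : Int) : List Int :=
  if PySem.List.pyGetD distances i 0 > 0 then PySem.Set.add (PySem.Set.add s (i - 1)) i else s

-- Adding an upper bound to a strictly increasing list keeps it strictly increasing and bounded.
lemma pv_add_bound (s : List Int) (c : Int) (hp : s.Pairwise (· < ·)) (hb : ∀ x ∈ s, x ≤ c) :
    (PySem.Set.add s c).Pairwise (· < ·) ∧ ∀ x ∈ PySem.Set.add s c, x ≤ c := by
  unfold PySem.Set.add PySem.Set.contains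
  split_ifs with h
  · exact ⟨hp, hb⟩
  · have hc : c ∉ s := by simpa using h
    refine ⟨List.pairwise_append.2 ⟨hp, by simp, ?_⟩, ?_⟩
    · intro x hx y hy
      simp only [List.mem_singleton] at hy
      subst hy
      exact lt_of_le_of_ne (hb x hx) (fun he => hc (he ▸ hx))
    · intro x hx
      rcases List.mem_append.1 hx with h' | h'
      · exact hb x h'
      · simp only [List.mem_singleton] at h'; omega

-- Loop invariant: after processing range(1, k), the accumulator is strictly increasing
-- with every element ≤ k - 1.
lemma pv_inv (distances : List Int) (k : Nat) :
    ((PySem.List.pyRange 1 (k : Int)).foldl (pvStep distances) []).Pairwise (· < ·) ∧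
    ∀ x ∈ (PySem.List.pyRange 1 (k : Int)).foldl (pvStep distances) [], x ≤ (k : Int) - 1 := by
  induction k with
  | zero => simp [PySem.List.pyRange_one_eq_nil (by omega : (0:Int) ≤ 1)]
  | succ k ih =>
    by_cases hk : k = 0
    · subst hk
      simp [PySem.List.pyRange_one_eq_nil (by omega : (1:Int) ≤ 1)]
    · have h1 : (1 : Int) ≤ (k : Int) := by omega
      have : (((k : Nat) + 1 : Nat) : Int) = (k : Int) + 1 := by push_cast; ring
      rw [this, PySem.List.pyRange_one_succ_right h1, List.foldl_append]
      obtain ⟨hp, hb⟩ := ih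
      set m := (PySem.List.pyRange 1 (k : Int)).foldl (pvStep distances) [] with hm
      simp only [List.foldl_cons, List.foldl_nil]
      unfold pvStep
      split_ifs with hd
      · have hb' : ∀ x ∈ m, x ≤ (k : Int) - 1 := hb
        obtain ⟨hp1, hb1⟩ := pv_add_bound m ((k : Int) - 1) hp hb'
        obtain ⟨hp2, hb2⟩ := pv_add_bound (PySem.Set.add m ((k : Int) - 1)) (k : Int) hp1
          (fun x hx => by have := hb1 x hx; omega)
        exact ⟨hp2, fun x hx => by have := hb2 x hx; omega⟩
      · exact ⟨hp, fun x hx => by have := hb x hx; omega⟩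

-- Membership through one step of A's loop.
lemma pv_mem_step (distances : List Int) (s : List Int) (i x : Int) :
    x ∈ pvStep distances s i ↔
      x ∈ s ∨ (PySem.List.pyGetD distances i 0 > 0 ∧ (x = i - 1 ∨ x = i)) := by
  unfold pvStep
  split_ifs with hd
  · simp only [PySem.Set.mem_add]; tauto
  · tauto

-- Membership in A's loop accumulator: x was appended by some trigger i with distances[i] > 0.
lemma pv_mem_fold (distances : List Int) (k : Nat) (x : Int) :
    x ∈ (PySem.List.pyRange 1 (k : Int)).foldl (pvStep distances) [] ↔
    ∃ i : Int, 1 ≤ i ∧ i < (k : Int) ∧ PySem.List.pyGetD distances i 0 > 0 ∧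
      (x = i - 1 ∨ x = i) := by
  induction k with
  | zero =>
    simp only [PySem.List.pyRange_one_eq_nil (by omega : ((0:Nat):Int) ≤ 1), List.foldl_nil,
      List.not_mem_nil, false_iff]
    rintro ⟨i, h1, h2, -, -⟩; omega
  | succ k ih =>
    by_cases hk : k = 0
    · subst hk
      simp only [PySem.List.pyRange_one_eq_nil (by omega : ((1:Nat):Int) ≤ 1), List.foldl_nil,
        List.not_mem_nil, false_iff]
      rintro ⟨i, h1, h2, -, -⟩; omega
    · have h1 : (1 : Int) ≤ (k : Int) := by omega
      have hcast : (((k : Nat) + 1 : Nat) : Int) = (k : Int) + 1 := by push_cast; ring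
      rw [hcast, PySem.List.pyRange_one_succ_right h1, List.foldl_append]
      simp only [List.foldl_cons, List.foldl_nil]
      rw [pv_mem_step, ih]
      constructor
      · rintro (⟨i, hi1, hi2, hi3, hi4⟩ | ⟨hd, hx⟩)
        · exact ⟨i, hi1, by omega, hi3, hi4⟩
        · exact ⟨(k : Int), by omega, by omega, hd, hx⟩
      · rintro ⟨i, hi1, hi2, hi3, hi4⟩
        by_cases hik : i < (k : Int)
        · exact Or.inl ⟨i, hi1, hik, hi3, hi4⟩
        · have hieq : i = (k : Int) := by omega
          subst hieq
          exact Or.inr ⟨hi3, hi4⟩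

-- Two strictly increasing integer lists with the same members are equal.
lemma pv_sorted_ext (a b : List Int) (ha : a.Pairwise (· < ·)) (hb : b.Pairwise (· < ·))
    (h : ∀ x, x ∈ a ↔ x ∈ b) : a = b := by
  induction a generalizing b with
  | nil =>
    cases b with
    | nil => rfl
    | cons y ys => exact absurd ((h y).2 (by simp)) (by simp)
  | cons x xs iha =>
    cases b with
    | nil => exact absurd ((h x).1 (by simp)) (by simp)
    | cons y ys =>
      obtain ⟨hax, hap⟩ := List.pairwise_cons.1 ha
      obtain ⟨hby, hbp⟩ := List.pairwise_cons.1 hb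
      have hxy : x = y := by
        have h1 := (h x).1 (by simp)
        have h2 := (h y).2 (by simp)
        simp only [List.mem_cons] at h1 h2
        rcases h1 with h1 | h1
        · exact h1
        · rcases h2 with h2 | h2
          · exact h2.symm
          · have := hby x h1; have := hax y h2; omega
      subst hxy
      have htail : ∀ z, z ∈ xs ↔ z ∈ ys := by
        intro z
        constructor
        · intro hz
          have hlt := hax z hz
          have := (h z).1 (List.mem_cons_of_mem _ hz)
          simp only [List.mem_cons] at this
          rcases this with h' | h'
          · omega
          · exact h'
        · intro hz
          have hlt := hby z hz
          have := (h z).2 (List.mem_cons_of_mem _ hz)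
          simp only [List.mem_cons] at this
          rcases this with h' | h'
          · omega
          · exact h'
      rw [iha ys hap hbp htail]

-- Python's "if x not in s: s.append(x)" is exactly Set.add.
lemma pv_append_if_eq_add (s : List Int) (x : Int) :
    (if s.contains x = false then s ++ [x] else s) = PySem.Set.add s x := by
  unfold PySem.Set.add PySem.Set.contains
  cases h : s.contains x <;> simp

-- A's loop body (zeta-reduced) equals pvStep on every index of the range.
lemma pv_body_eq (optimal_trajectory distances : List Int) (acc : List Int) (i : Int)
    (hi : i ∈ PySem.List.pyRange 1 (optimal_trajectory.length : Int)) :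
    (if PySem.List.pyGetD distances i 0 > 0 then
       if (if acc.contains (i - 1) = false ∧ 0 ≤ i then acc ++ [i - 1] else acc).contains i
           = false then
         (if acc.contains (i - 1) = false ∧ 0 ≤ i then acc ++ [i - 1] else acc) ++ [i]
       else if acc.contains (i - 1) = false ∧ 0 ≤ i then acc ++ [i - 1] else acc
     else acc) = pvStep distances acc i := by
  have h0 : (0 : Int) ≤ i := by
    have := (PySem.List.mem_pyRange_one).1 hi; omega
  simp only [h0, and_true, pv_append_if_eq_add]
  rfl

-- B's filter condition.
def pvCond (distances : List Int) (j : Int) : Bool :=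
  decide (PySem.List.pyGetD distances (j + 1) 0 > 0) ||
    (decide ((1 : Int) ≤ j) && decide (PySem.List.pyGetD distances j 0 > 0))

-- Membership in B's output.
lemma pv_mem_alt (n : Int) (distances : List Int) (x : Int) :
    x ∈ (PySem.List.pyRange 0 (n - 1)).filter (pvCond distances) ++ [n - 1] ↔
    (0 ≤ x ∧ x < n - 1 ∧ pvCond distances x = true) ∨ x = n - 1 := by
  simp only [List.mem_append, List.mem_filter, List.mem_singleton, PySem.List.mem_pyRange_one]
  tauto

-- B's output is strictly increasing.
lemma pv_alt_pairwise (n : Int) (distances : List Int) :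
    ((PySem.List.pyRange 0 (n - 1)).filter (pvCond distances) ++ [n - 1]).Pairwise (· < ·) := by
  refine List.pairwise_append.2 ⟨List.Pairwise.filter _ (PySem.List.pairwise_lt_pyRange_one 0 (n-1)), by simp, ?_⟩
  intro x hx y hy
  simp only [List.mem_singleton] at hy
  subst hy
  have := (PySem.List.mem_pyRange_one).1 (List.mem_of_mem_filter hx)
  omega

theorem pv_main (optimal_trajectory distances : List Int) :
    compute_salient_indices optimal_trajectory distances =
      compute_salient_indices_alt optimal_trajectory distances := by
  unfold compute_salient_indices compute_salient_indices_alt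
  simp only [PySem.List.len]
  rw [PySem.List.foldl_congr_mem
        (PySem.List.pyRange 1 (optimal_trajectory.length : Int)) _ (pvStep distances)
        ([] : List Int)
        (fun acc x hx => pv_body_eq optimal_trajectory distances acc x hx),
      pv_append_if_eq_add]
  set n : Int := (optimal_trajectory.length : Int) with hn
  obtain ⟨hp, hb⟩ := pv_inv distances optimal_trajectory.length
  obtain ⟨hp2, _⟩ := pv_add_bound _ (n - 1) hp hb
  refine pv_sorted_ext _ _ hp2 (pv_alt_pairwise n distances) ?_
  intro x
  have hlam : (fun j : Int =>
      decide (PySem.List.pyGetD distances (j + 1) 0 > 0) ||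
        (decide ((1 : Int) ≤ j) && decide (PySem.List.pyGetD distances j 0 > 0)))
      = pvCond distances := rfl
  rw [PySem.Set.mem_add, pv_mem_fold, hlam, pv_mem_alt]
  unfold pvCond
  constructor
  · rintro (⟨i, hi1, hi2, hi3, hi4⟩ | hx)
    · by_cases hxn : x = n - 1
      · exact Or.inr hxn
      · refine Or.inl ⟨by omega, by omega, ?_⟩
        rcases hi4 with h | h
        · subst h
          simp only [Bool.or_eq_true, decide_eq_true_eq]
          left
          have : i - 1 + 1 = i := by omega
          rw [this]; exact hi3
        · subst h
          simp only [Bool.or_eq_true, Bool.and_eq_true, decide_eq_true_eq]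
          exact Or.inr ⟨hi1, hi3⟩
    · exact Or.inr hx
  · rintro (⟨hx0, hxn, hc⟩ | hx)
    · simp only [Bool.or_eq_true, Bool.and_eq_true, decide_eq_true_eq] at hc
      rcases hc with h | ⟨h1, h2⟩
      · exact Or.inl ⟨x + 1, by omega, by omega, h, Or.inl (by omega)⟩
      · exact Or.inl ⟨x, h1, by omega, h2, Or.inr rfl⟩
    · exact Or.inr hx

-- ===== VERDICT (by name: the statement is the Claim_ definition above) =====
theorem compute_salient_indices_spec : Claim_equal_compute_salient_indices := by
  intro optimal_trajectory distances _hdom _hpre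
  unfold Spec_compute_salient_indices
  exact pv_main optimal_trajectory distances
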